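-- pv_equiv track=rewrite | github.com/kua08f91-hash/keiba-oracle | backend/scraper/keibabook.py | _parse_packed_combos
-- ===== SOURCE A (Python) =====
-- def _parse_packed_combos(text: str, n_combos: int, combo_size: int = 2) -> list:
--     """Parse packed combo text like '2-44-52-5' into [[2,4],[4,5],[2,5]].
--
--     Strategy: Split by '-' to get segments, extract horse numbers (1-2 digits,
--     max 18) from each segment, then group flat list into pairs.
--     """
--     segments = text.split("-")
--     # Extract individual horse numbers from all segments
--     all_nums = []
--     for seg in segments:
--         seg = seg.strip()
--         i = 0
--         while i < len(seg):
--             if i + 1 < len(seg) and seg[i:i+2].isdigit() and int(seg[i:i+2]) <= 18 and int(seg[i:i+2]) >= 10: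
--                 all_nums.append(int(seg[i:i+2]))
--                 i += 2
--             elif seg[i].isdigit():
--                 all_nums.append(int(seg[i]))
--                 i += 1
--             else:
--                 i += 1
--
--     # Group into combos of combo_size
--     combos = []
--     for i in range(0, len(all_nums) - combo_size + 1, combo_size):
--         combos.append(all_nums[i:i+combo_size])
--         if len(combos) >= n_combos:
--             break
--
--     return combos
-- ===== SOURCE B (Python) =====
-- import re
--
-- def _parse_packed_combos(text: str, n_combos: int, combo_size: int = 2) -> list:
--     """Parse packed combo text like '2-44-52-5' into [[2,4],[4,5],[2,5]].
--
--     Extraction done with one regex pass: '1[0-8]|\\d' takes a two-digit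
--     number 10-18 when possible, else a single digit; every non-digit
--     (including the '-' separators and whitespace) is simply not matched,
--     so no splitting or stripping is needed. Grouping is unchanged.
--     """
--     all_nums = [int(m) for m in re.findall(r"1[0-8]|\d", text)]
--     combos = []
--     for i in range(0, len(all_nums) - combo_size + 1, combo_size):
--         combos.append(all_nums[i:i + combo_size])
--         if len(combos) >= n_combos:
--             break
--     return combos
-- ===== Notes on version B (the rewrite author's own statement) =====
-- stated objective: idiomatic
-- what changed: The hand-written split('-')/strip()/index-walking while-loop extractor is replaced by a single regex pass re.findall(r'1[0-8]|\d', text) (two-digit 10-18 preferred, non-digits skipped, so no splitting or stripping is needed); the grouping loop is kept as is.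
import Mathlib
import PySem

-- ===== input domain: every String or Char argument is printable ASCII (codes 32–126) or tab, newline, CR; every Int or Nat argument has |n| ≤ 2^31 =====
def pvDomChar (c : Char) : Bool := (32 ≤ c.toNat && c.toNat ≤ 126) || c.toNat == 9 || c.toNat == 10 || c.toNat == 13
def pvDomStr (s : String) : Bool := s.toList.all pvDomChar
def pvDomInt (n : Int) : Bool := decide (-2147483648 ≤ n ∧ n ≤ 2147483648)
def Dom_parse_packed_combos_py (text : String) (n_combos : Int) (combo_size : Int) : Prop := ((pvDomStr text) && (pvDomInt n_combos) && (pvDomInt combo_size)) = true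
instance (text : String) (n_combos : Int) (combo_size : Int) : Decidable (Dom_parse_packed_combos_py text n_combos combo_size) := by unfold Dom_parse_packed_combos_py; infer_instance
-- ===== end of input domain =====

-- B replaces A's split('-')/strip()/while-loop digit extractor by a single regex-style
-- scan of the whole text ('1[0-8]|\d': two-digit 10-18 preferred, non-digits skipped);
-- objective: more idiomatic extraction, same grouping loop.

-- ===== PORT A =====

-- the while-loop of A over one (stripped) segment: index i becomes the unread suffix
def pvScanA : List Char → List Int
  | c1 :: c2 :: rest =>
      -- seg[i:i+2].isdigit() = both chars are digits; int(seg[i:i+2]) on a checked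
      -- 2-char digit string is 10*d1+d2 (exact for ASCII digits)
      if PySem.Chars.isdigit c1 ∧ PySem.Chars.isdigit c2 ∧
         (10 : Int) ≤ ((c1.toNat : Int) - 48) * 10 + ((c2.toNat : Int) - 48) ∧
         ((c1.toNat : Int) - 48) * 10 + ((c2.toNat : Int) - 48) ≤ 18 then
        (((c1.toNat : Int) - 48) * 10 + ((c2.toNat : Int) - 48)) :: pvScanA rest
      else if PySem.Chars.isdigit c1 then
        ((c1.toNat : Int) - 48) :: pvScanA (c2 :: rest)
      else
        pvScanA (c2 :: rest)
  | [c] => if PySem.Chars.isdigit c then [((c.toNat : Int) - 48)] else []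
  | [] => []

-- the grouping loop: 'for i in range(0, len-cs+1, cs): append; break if len(combos) >= n_combos'
def pvGroupGoA (nums : List Int) (n_combos cs : Int) : List Int → List (List Int) → List (List Int)
  | [], acc => acc
  | i :: rest, acc =>
      let acc' := acc ++ [PySem.List.slice nums (some i) (some (i + cs))]
      if n_combos ≤ (acc'.length : Int) then acc' else pvGroupGoA nums n_combos cs rest acc'

def parse_packed_combos_py (text : String) (n_combos : Int) (combo_size : Int) : List (List Int) :=
  -- text.split("-"): the separator is the nonempty literal "-", so split never raises
  let segments := PySem.Chars.splitOn text.toList ['-']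
  let all_nums := segments.foldl (fun acc seg => acc ++ pvScanA (PySem.Chars.strip seg)) []
  pvGroupGoA all_nums n_combos combo_size
    (PySem.List.pyRange 0 ((all_nums.length : Int) - combo_size + 1) combo_size) []

-- ===== PORT B =====

-- re.findall(r'1[0-8]|\d', text): leftmost scan, first alternative preferred
def pvFindAll : List Char → List (List Char)
  | c1 :: c2 :: rest =>
      if c1 = '1' ∧ '0' ≤ c2 ∧ c2 ≤ '8' then [c1, c2] :: pvFindAll rest
      else if PySem.Chars.isdigit c1 then [c1] :: pvFindAll (c2 :: rest)
      else pvFindAll (c2 :: rest)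
  | [c] => if PySem.Chars.isdigit c then [[c]] else []
  | [] => []

-- int(m) on a matched (all-digit) string; exact for ASCII digit strings
def pvToInt (m : List Char) : Int := m.foldl (fun a c => a * 10 + ((c.toNat : Int) - 48)) 0

-- B's grouping loop (same Python code as in A)
def pvGroupGoB (nums : List Int) (n_combos cs : Int) : List Int → List (List Int) → List (List Int)
  | [], acc => acc
  | i :: rest, acc =>
      let acc' := acc ++ [PySem.List.slice nums (some i) (some (i + cs))]
      if n_combos ≤ (acc'.length : Int) then acc' else pvGroupGoB nums n_combos cs rest acc'

def parse_packed_combos_py_alt (text : String) (n_combos : Int) (combo_size : Int) : List (List Int) :=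
  let all_nums := (pvFindAll text.toList).map pvToInt
  pvGroupGoB all_nums n_combos combo_size
    (PySem.List.pyRange 0 ((all_nums.length : Int) - combo_size + 1) combo_size) []

-- ===== PRECONDITION & SPEC =====
-- combo_size = 0 makes range(0, …, 0) raise ValueError in both programs
def Pre_parse_packed_combos_py (text : String) (n_combos : Int) (combo_size : Int) : Prop :=
  combo_size ≠ 0
instance (text : String) (n_combos : Int) (combo_size : Int) : Decidable (Pre_parse_packed_combos_py text n_combos combo_size) := by unfold Pre_parse_packed_combos_py; infer_instance

def pvWitness_parse_packed_combos_py : String × Int × Int := ("2-44-52-5", 3, 2)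

def Spec_parse_packed_combos_py (text : String) (n_combos : Int) (combo_size : Int) (out : List (List Int)) : Prop := out = parse_packed_combos_py_alt text n_combos combo_size
instance (text : String) (n_combos : Int) (combo_size : Int) (out : List (List Int)) : Decidable (Spec_parse_packed_combos_py text n_combos combo_size out) := by unfold Spec_parse_packed_combos_py; infer_instance

-- ===== CLAIM (what is proved, stated in full; the proofs are below) =====
def Claim_equal_parse_packed_combos_py : Prop := ∀ (text : String) (n_combos : Int) (combo_size : Int), Dom_parse_packed_combos_py text n_combos combo_size → Pre_parse_packed_combos_py text n_combos combo_size → Spec_parse_packed_combos_py text n_combos combo_size (parse_packed_combos_py text n_combos combo_size)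

-- ===== LEMMAS AND PROOFS =====

theorem pvChEq (a b : Char) : (a = b) ↔ a.toNat = b.toNat := by
  constructor
  · rintro rfl; rfl
  · intro h; exact Char.ext (UInt32.toNat_inj.mp h)

theorem pvChLe (a b : Char) : (a ≤ b) ↔ a.toNat ≤ b.toNat := by
  rw [Char.le_def]; exact ge_iff_le

-- the two grouping loops are the same loop
theorem pvGroupGo_eq (nums : List Int) (n cs : Int) (idxs : List Int) (acc : List (List Int)) :
    pvGroupGoA nums n cs idxs acc = pvGroupGoB nums n cs idxs acc := by
  induction idxs generalizing acc with
  | nil => rfl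
  | cons i rest ih => simp only [pvGroupGoA, pvGroupGoB]; split <;> simp [ih]

-- A's two-digit guard coincides with the regex class '1[0-8]'
theorem pvCond_iff (c1 c2 : Char) :
    (PySem.Chars.isdigit c1 ∧ PySem.Chars.isdigit c2 ∧
     (10 : Int) ≤ ((c1.toNat : Int) - 48) * 10 + ((c2.toNat : Int) - 48) ∧
     ((c1.toNat : Int) - 48) * 10 + ((c2.toNat : Int) - 48) ≤ 18)
    ↔ (c1 = '1' ∧ '0' ≤ c2 ∧ c2 ≤ '8') := by
  simp only [PySem.Chars.isdigit, Bool.and_eq_true, decide_eq_true_eq, pvChLe, pvChEq]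
  have h0 : ('0' : Char).toNat = 48 := rfl
  have h1 : ('1' : Char).toNat = 49 := rfl
  have h8 : ('8' : Char).toNat = 56 := rfl
  have h9 : ('9' : Char).toNat = 57 := rfl
  rw [h0, h1, h8, h9]
  omega

-- the regex matches, converted with int(), are exactly A's per-segment scan
theorem pvFindAll_eq_scanA (l : List Char) : (pvFindAll l).map pvToInt = pvScanA l := by
  induction hn : l.length using Nat.strong_induction_on generalizing l with
  | _ n ih =>
    match l with
    | [] => rfl
    | [c] => simp only [pvFindAll, pvScanA]; split <;> simp [pvToInt]
    | c1 :: c2 :: rest =>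
      have ih1 := ih rest.length (by simp only [← hn, List.length_cons]; omega) rest rfl
      have ih2 := ih (rest.length + 1) (by simp only [← hn, List.length_cons]; omega) (c2 :: rest) rfl
      simp only [pvFindAll, pvScanA, pvCond_iff c1 c2]
      split
      · rename_i h
        obtain ⟨h1, _, _⟩ := h
        rw [List.map_cons, ih1]
        subst h1
        simp [pvToInt]
      · split <;> simp [ih2, pvToInt]

theorem pvIsspace_not_isdigit (c : Char) (h : PySem.Chars.isspace c = true) :
    PySem.Chars.isdigit c = false := by
  simp only [PySem.Chars.isspace, PySem.Chars.isdigit, pvChLe, Bool.or_eq_true,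
    Bool.and_eq_true, decide_eq_true_eq, Bool.and_eq_false_imp, decide_eq_false_iff_not] at *
  have h0 : ('0' : Char).toNat = 48 := rfl
  have h9 : ('9' : Char).toNat = 57 := rfl
  rw [h0, h9]
  omega

-- scanning skips a non-digit prefix
theorem pvScanA_nondigit_prefix (p l : List Char) (h : ∀ c ∈ p, PySem.Chars.isdigit c = false) :
    pvScanA (p ++ l) = pvScanA l := by
  induction p with
  | nil => rfl
  | cons c p' ih =>
    have hc : PySem.Chars.isdigit c = false := h c (by simp)
    have ih' := ih (fun d hd => h d (by simp [hd]))
    match hpl : p' ++ l with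
    | [] =>
      have hp : p' = [] ∧ l = [] := by cases p' <;> simp_all
      obtain ⟨rfl, rfl⟩ := hp
      simp [pvScanA, hc]
    | d :: t => rw [List.cons_append, hpl]; simp [pvScanA, hc, ← hpl, ih']

-- and a non-digit suffix
theorem pvScanA_nondigit_suffix (l p : List Char) (h : ∀ c ∈ p, PySem.Chars.isdigit c = false) :
    pvScanA (l ++ p) = pvScanA l := by
  induction hn : l.length using Nat.strong_induction_on generalizing l with
  | _ n ih =>
    match l with
    | [] => simpa [pvScanA] using pvScanA_nondigit_prefix p [] h
    | [c] =>
      match p with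
      | [] => simp
      | d :: p' =>
        have hd : PySem.Chars.isdigit d = false := h d (by simp)
        have hrest : pvScanA (d :: p') = [] := by
          simpa [pvScanA] using pvScanA_nondigit_prefix (d :: p') [] h
        cases hdc : PySem.Chars.isdigit c
        · simp [pvScanA, hd, hdc, hrest]
        · simp [pvScanA, hd, hdc, hrest]
    | c1 :: c2 :: rest =>
      have h2 := ih (rest.length + 1) (by simp only [← hn, List.length_cons]; omega) (c2 :: rest) rfl
      rw [List.cons_append] at h2
      simp only [List.cons_append, pvScanA]
      rw [ih rest.length (by simp only [← hn, List.length_cons]; omega) rest rfl, h2]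

-- scanning through a '-' separator is scanning the two sides independently
theorem pvScanA_dash (a b : List Char) : pvScanA (a ++ '-' :: b) = pvScanA a ++ pvScanA b := by
  induction hn : a.length using Nat.strong_induction_on generalizing a with
  | _ n ih =>
    match a with
    | [] =>
      have hdash : PySem.Chars.isdigit '-' = false := by decide
      match b with
      | [] => simp [pvScanA, hdash]
      | d :: t => simp [pvScanA, hdash]
    | [c] =>
      have hdash : PySem.Chars.isdigit '-' = false := by decide
      match b with
      | [] => simp [pvScanA, hdash]
      | d :: t => simp [pvScanA, hdash]; split <;> simp
    | c1 :: c2 :: rest =>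
      have h2 := ih (rest.length + 1) (by simp only [← hn, List.length_cons]; omega) (c2 :: rest) rfl
      rw [List.cons_append] at h2
      simp only [List.cons_append, pvScanA]
      rw [ih rest.length (by simp only [← hn, List.length_cons]; omega) rest rfl, h2]
      split
      · simp
      · split <;> simp

-- strip() only removes whitespace, which the scan skips anyway
theorem pvScanA_strip (s : List Char) : pvScanA (PySem.Chars.strip s) = pvScanA s := by
  unfold PySem.Chars.strip PySem.Chars.lstrip PySem.Chars.rstrip
  have h1 : pvScanA (s.dropWhile PySem.Chars.isspace) = pvScanA s := by
    conv_rhs => rw [← List.takeWhile_append_dropWhile (p := PySem.Chars.isspace) (l := s)]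
    rw [pvScanA_nondigit_prefix]
    intro c hc
    exact pvIsspace_not_isdigit c (List.mem_takeWhile_imp hc)
  set t := s.dropWhile PySem.Chars.isspace with ht
  rw [← h1]
  have hdecomp : t = (t.reverse.dropWhile PySem.Chars.isspace).reverse
      ++ (t.reverse.takeWhile PySem.Chars.isspace).reverse := by
    rw [← List.reverse_append, List.takeWhile_append_dropWhile, List.reverse_reverse]
  conv_rhs => rw [hdecomp]
  rw [pvScanA_nondigit_suffix]
  intro c hc
  exact pvIsspace_not_isdigit c (List.mem_takeWhile_imp (by simpa using hc))

-- my own reading of split('-') …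
def pvSplitAux : List Char → List Char → List (List Char)
  | [], cur => [cur.reverse]
  | c :: rest, cur => if c = '-' then cur.reverse :: pvSplitAux rest [] else pvSplitAux rest (c :: cur)

-- … and of '-'.join(…)
def pvJoin : List (List Char) → List Char
  | [] => []
  | [x] => x
  | x :: y :: t => x ++ '-' :: pvJoin (y :: t)

theorem pvSplitOn_go_eq (fuel : Nat) (l cur : List Char) (acc : List (List Char))
    (h : l.length < fuel) :
    PySem.Chars.splitOn.go ['-'] fuel l cur acc = acc.reverse ++ pvSplitAux l cur := by
  induction fuel generalizing l cur acc with
  | zero => omega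
  | succ fuel ih =>
    match l with
    | [] => simp [PySem.Chars.splitOn.go, pvSplitAux]
    | c :: rest =>
      rw [PySem.Chars.splitOn.go]
      by_cases hc : c = '-'
      · subst hc
        have hpre : List.isPrefixOf ['-'] ('-' :: rest) = true := by
          simp [List.isPrefixOf]
        simp only [hpre, if_true]
        rw [ih _ _ _ (by simpa using Nat.lt_of_succ_lt_succ h)]
        simp [pvSplitAux]
      · have hpre : List.isPrefixOf ['-'] (c :: rest) = false := by
          simp only [List.isPrefixOf]
          simp [Ne.symm hc]
        simp only [hpre, Bool.false_eq_true, if_false]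
        rw [ih _ _ _ (by simpa using Nat.lt_of_succ_lt_succ h)]
        simp [pvSplitAux, hc]

theorem pvSplitAux_ne_nil (l cur : List Char) : pvSplitAux l cur ≠ [] := by
  induction l generalizing cur with
  | nil => simp [pvSplitAux]
  | cons c rest ih =>
    simp only [pvSplitAux]
    split
    · simp
    · exact ih _

theorem pvJoin_splitAux (l cur : List Char) : pvJoin (pvSplitAux l cur) = cur.reverse ++ l := by
  induction l generalizing cur with
  | nil => simp [pvSplitAux, pvJoin]
  | cons c rest ih =>
    simp only [pvSplitAux]
    by_cases hc : c = '-'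
    · subst hc
      rw [if_pos rfl]
      match hsa : pvSplitAux rest [] with
      | [] => exact absurd hsa (pvSplitAux_ne_nil rest [])
      | y :: t =>
        have h := ih (cur := [])
        rw [hsa] at h
        simp only [List.reverse_nil, List.nil_append] at h
        simp [pvJoin, h]
    · rw [if_neg hc, ih]
      simp

theorem pvScanA_join (segs : List (List Char)) :
    pvScanA (pvJoin segs) = (segs.map pvScanA).flatten := by
  match segs with
  | [] => rfl
  | [x] => simp [pvJoin]
  | x :: y :: t =>
    simp only [pvJoin, List.map_cons, List.flatten_cons]
    rw [pvScanA_dash, pvScanA_join (y :: t)]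
    simp

-- the full-text scan equals A's split/strip/scan pipeline
theorem pvScanA_splitOn (s : List Char) :
    ((PySem.Chars.splitOn s ['-']).map fun seg => pvScanA (PySem.Chars.strip seg)).flatten
      = pvScanA s := by
  unfold PySem.Chars.splitOn
  rw [pvSplitOn_go_eq _ _ _ _ (by omega)]
  simp only [List.reverse_nil, List.nil_append]
  have hmap : (pvSplitAux s []).map (fun seg => pvScanA (PySem.Chars.strip seg))
      = (pvSplitAux s []).map pvScanA := by
    exact List.map_congr_left fun seg _ => pvScanA_strip seg
  rw [hmap, ← pvScanA_join, pvJoin_splitAux]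
  simp

-- ===== VERDICT (by name: the statement is the Claim_ definition above) =====
theorem parse_packed_combos_py_spec : Claim_equal_parse_packed_combos_py := by
  intro text n_combos combo_size _ _
  show parse_packed_combos_py text n_combos combo_size
      = parse_packed_combos_py_alt text n_combos combo_size
  unfold parse_packed_combos_py parse_packed_combos_py_alt
  dsimp only
  rw [PySem.List.foldl_append_eq_flatMap, List.flatMap_def, pvFindAll_eq_scanA,
      pvScanA_splitOn, List.nil_append, pvGroupGo_eq]
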